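-- pv_equiv track=rewrite | github.com/clararehmann/epistasis | epistasis/mapping.py | mutations_to_sites
-- ===== SOURCE A (Python) =====
-- import itertools as it
--
-- def mutations_to_sites(order, mutations, start_order=0):
--     """Build interaction sites up to nth order given a mutation alphabet.
--
--     Parameters
--     ----------
--     order : int
--         order of interactions
--     mutations  : dict
--         `mutations = { site_number : ["mutation-1", "mutation-2"] }`.
--         If the site alphabet is note included, the model will assume binary
--         between wildtype and derived.
--
--     Example
--     -------
--     .. code-block:: python
--
--         mutations = {
--             0: ["A", "V"],
--             1: ["A", "V"],
--             ...
--         }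
--
--     Returns
--     -------
--     sites : list
--         list of all interaction sites for system with
--         sequences of a given length and epistasis with given order.
--     """
--     # Convert a mutations mapping dictionary to a site mapping dictionary
--     sitemap = dict()
--     n_sites = 1
--     for m in mutations:
--         if mutations[m] is None:
--             sitemap[m] = None
--         else:
--             sitemap[m] = list(range(n_sites, n_sites + len(mutations[m]) - 1))
--             n_sites += len(mutations[m]) - 1
--
--     # Include the intercept interaction?
--     if start_order == 0:
--         sites = [[0]]
--         orders = range(1, order + 1)
--     else:
--         sites = list()
--         orders = range(start_order, order + 1)
--
--     length = len(sitemap)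
--     # Recursive algorithm that's difficult to follow.
--
--     # Iterate through each order
--     for o in orders:
--         # Iterate through all combinations of orders with given length
--         for term in it.combinations(range(length), o):
--             # If any sites in `term` == None, skip this term.
--             bad_term = False
--             lists = []
--             for i in range(len(term)):
--                 if sitemap[term[i]] is None:
--                     bad_term = True
--                     break
--                 else:
--                     lists.append(sitemap[term[i]])
--             # Else, add interactions combinations to list
--             if bad_term is False:
--                 for r in it.product(*lists):
--                     sites.append(list(r))
--
--     return sites
-- ===== SOURCE B (Python) =====
-- def mutations_to_sites(order, mutations, start_order=0):
--     """Build interaction sites up to nth order given a mutation alphabet.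
--
--     Alternative decomposition: a recursive DFS over valid-site indices replaces
--     itertools.combinations + None-filter, and an iterative fold replaces
--     itertools.product.
--     """
--     # Convert the mutations mapping to a site-expansion mapping (same prologue as A)
--     sitemap = dict()
--     n_sites = 1
--     for m in mutations:
--         if mutations[m] is None:
--             sitemap[m] = None
--         else:
--             sitemap[m] = list(range(n_sites, n_sites + len(mutations[m]) - 1))
--             n_sites += len(mutations[m]) - 1
--     length = len(sitemap)
--
--     # expansion lists of the valid (non-None) sites, in site order
--     valid = [e for e in (sitemap.get(i) for i in range(length)) if e is not None]
--
--     def products(chosen):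
--         # cartesian product of the chosen expansion lists, last coordinate fastest
--         prods = [[]]
--         for l in chosen:
--             prods = [p + [v] for p in prods for v in l]
--         return prods
--
--     def choose(start, k, chosen, out):
--         # DFS selecting k expansion lists at indices >= start, in order
--         if k == 0:
--             out.extend(products(chosen))
--         else:
--             for i in range(start, len(valid) - k + 1):
--                 choose(i + 1, k - 1, chosen + [valid[i]], out)
--
--     sites = [[0]] if start_order == 0 else []
--     for o in range(max(start_order, 1), order + 1):
--         choose(0, o, [], sites)
--     return sites
-- ===== Notes on version B (the rewrite author's own statement) =====
-- stated objective: alternative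
-- what changed: The itertools.combinations + per-term None-filter + itertools.product double phase is replaced by a single recursive include/skip DFS over the valid sites' expansion lists that selects k lists and then expands their cartesian product with an accumulator.
-- outside the precondition, e.g. on mutations_to_sites(2, {0: None, 7: ['A', 'B']}, 2): A returns [], B returns []
import Mathlib
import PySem

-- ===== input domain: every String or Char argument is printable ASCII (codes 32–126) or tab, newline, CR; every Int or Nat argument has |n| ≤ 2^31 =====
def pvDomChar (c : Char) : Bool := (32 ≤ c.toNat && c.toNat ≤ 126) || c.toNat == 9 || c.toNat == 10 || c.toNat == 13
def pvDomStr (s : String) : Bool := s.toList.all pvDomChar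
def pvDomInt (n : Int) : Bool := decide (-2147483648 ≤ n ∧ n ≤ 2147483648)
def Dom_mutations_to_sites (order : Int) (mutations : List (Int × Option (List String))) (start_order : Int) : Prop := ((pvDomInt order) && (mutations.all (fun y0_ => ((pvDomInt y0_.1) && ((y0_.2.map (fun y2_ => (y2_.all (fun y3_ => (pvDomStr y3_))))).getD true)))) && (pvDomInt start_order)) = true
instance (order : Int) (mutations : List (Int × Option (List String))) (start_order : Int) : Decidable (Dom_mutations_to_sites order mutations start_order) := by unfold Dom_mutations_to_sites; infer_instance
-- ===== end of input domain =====

-- B replaces the itertools.combinations + None-filter + itertools.product phases of A by one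
-- recursive include/skip DFS over the valid sites' expansion lists (alternative decomposition, not faster).


-- ===== PORT A =====

-- shared prologue of A and B (both Pythons contain this identical sitemap-building loop):
-- iterate the dict's keys in insertion order (first occurrence; lookup = first match)
def buildSitemap (mutations : List (Int × Option (List String))) : PySem.Dict Int (Option (List Int)) :=
  ((PySem.List.dedup (mutations.map (·.1))).foldl
    (fun (st : PySem.Dict Int (Option (List Int)) × Int) m =>
      match (PySem.Dict.mk mutations).getD m none with
      | none => (st.1.insert m none, st.2)
      | some vs =>
        (st.1.insert m (some (PySem.List.pyRange st.2 (st.2 + (vs.length : Int) - 1) 1)),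
         st.2 + (vs.length : Int) - 1))
    (PySem.Dict.empty, 1)).1

-- port of itertools.combinations(xs, k): lexicographic combinations
def pyCombos {α : Type} : List α → Nat → List (List α)
  | _, 0 => [[]]
  | [], _ + 1 => []
  | x :: xs, k + 1 => (pyCombos xs k).map (x :: ·) ++ pyCombos xs (k + 1)

-- port of [list(r) for r in itertools.product(*lists)]: last coordinate varies fastest
def pyProd : List (List Int) → List (List Int)
  | [] => [[]]
  | l :: ls => l.flatMap (fun v => (pyProd ls).map (v :: ·))

-- A's inner prefix scan over a term: collect expansion lists, break (none) at the first None site.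
-- (A's python raises KeyError on a missing key; getD's default is never reached inside Pre_.)
def scanTermA (sm : PySem.Dict Int (Option (List Int))) : List Int → Option (List (List Int))
  | [] => some []
  | t :: rest =>
    match sm.getD t none with
    | none => none
    | some l => (scanTermA sm rest).map (l :: ·)

def mutations_to_sites (order : Int) (mutations : List (Int × Option (List String))) (start_order : Int) : List (List Int) :=
  let sitemap := buildSitemap mutations
  let len : Int := PySem.Dict.size sitemap
  let init : List (List Int) × List Int :=
    if start_order = 0 then ([[0]], PySem.List.pyRange 1 (order + 1) 1)
    else ([], PySem.List.pyRange start_order (order + 1) 1)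
  init.2.foldl
    (fun sites o =>
      (pyCombos (PySem.List.pyRange 0 len 1) o.toNat).foldl
        (fun sites term =>
          match scanTermA sitemap term with
          | none => sites
          | some lists => sites ++ pyProd lists)
        sites)
    init.1

-- ===== PORT B =====

-- products(chosen): iterative fold building the cartesian product, last coordinate fastest
def bProducts (chosen : List (List Int)) : List (List Int) :=
  chosen.foldl (fun prods l => prods.flatMap (fun p => l.map (fun v => p ++ [v]))) [[]]

-- choose(start, k, chosen, out): DFS selecting k expansion lists at indices >= start, in order
-- (valid[i] is always in range inside the loop bound, so pyGetD's default is never reached)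
def bChoose (valid : List (List Int)) (start : Int) (k : Nat) (chosen out : List (List Int)) : List (List Int) :=
  match k with
  | 0 => out ++ bProducts chosen
  | k' + 1 =>
    (PySem.List.pyRange start ((valid.length : Int) - (k' + 1) + 1) 1).foldl
      (fun o i => bChoose valid (i + 1) k' (chosen ++ [PySem.List.pyGetD valid i []]) o) out
termination_by k

def mutations_to_sites_alt (order : Int) (mutations : List (Int × Option (List String))) (start_order : Int) : List (List Int) :=
  let sitemap := buildSitemap mutations
  let len : Int := PySem.Dict.size sitemap
  let valid : List (List Int) :=
    ((PySem.List.pyRange 0 len 1).map (fun i => PySem.Dict.getD sitemap i none)).filterMap id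
  let sites0 : List (List Int) := if start_order = 0 then [[0]] else []
  (PySem.List.pyRange (max start_order 1) (order + 1) 1).foldl
    (fun sites o => bChoose valid 0 o.toNat [] sites) sites0

-- ===== PRECONDITION & SPEC =====
-- Pre_ excludes exactly the inputs where A raises: a negative start_order with a nonempty order
-- range (itertools ValueError), and sitemaps whose key set is not 0..n-1 while site lookups happen
-- (KeyError).  The second conjunct over-excludes the inputs where every lookup of a missing key is
-- shielded by an earlier None site, on which A happens to return (see the cite in claim.json).
def Pre_mutations_to_sites (order : Int) (mutations : List (Int × Option (List String))) (start_order : Int) : Prop :=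
  let keys := PySem.List.dedup (mutations.map (·.1))
  (start_order < 0 → order < start_order) ∧
  ((1 ≤ order ∧ start_order ≤ order ∧ max start_order 1 ≤ (keys.length : Int)) →
    ∀ i ∈ List.range keys.length, (i : Int) ∈ keys)
instance (order : Int) (mutations : List (Int × Option (List String))) (start_order : Int) : Decidable (Pre_mutations_to_sites order mutations start_order) := by unfold Pre_mutations_to_sites; infer_instance

def pvWitness_mutations_to_sites : Int × (List (Int × Option (List String))) × Int :=
  (2, [(0, some ["A", "V"]), (1, some ["A", "V", "T"]), (2, none)], 0)

def Spec_mutations_to_sites (order : Int) (mutations : List (Int × Option (List String))) (start_order : Int) (out : List (List Int)) : Prop := out = mutations_to_sites_alt order mutations start_order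
instance (order : Int) (mutations : List (Int × Option (List String))) (start_order : Int) (out : List (List Int)) : Decidable (Spec_mutations_to_sites order mutations start_order out) := by unfold Spec_mutations_to_sites; infer_instance

-- ===== CLAIM (what is proved, stated in full; the proofs are below) =====
def Claim_equal_mutations_to_sites : Prop := ∀ (order : Int) (mutations : List (Int × Option (List String))) (start_order : Int), Dom_mutations_to_sites order mutations start_order → Pre_mutations_to_sites order mutations start_order → Spec_mutations_to_sites order mutations start_order (mutations_to_sites order mutations start_order)

-- ===== LEMMAS AND PROOFS =====

-- A's term loop written as flatMap over the scan's successes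
theorem foldl_match_scan (f : List Int → Option (List (List Int)))
    (l : List (List Int)) (s : List (List Int)) :
    l.foldl (fun s t => match f t with | none => s | some ls => s ++ pyProd ls) s
      = s ++ (l.filterMap f).flatMap pyProd := by
  induction l generalizing s with
  | nil => simp
  | cons t rest ih =>
    simp only [List.foldl_cons, List.filterMap_cons]
    cases h : f t with
    | none => simp [ih]
    | some ls => simp [ih]

-- filtering the None sites out of the lexicographic combinations = combinations of the valid sites
theorem pyCombos_filterMap (sm : PySem.Dict Int (Option (List Int))) :
    ∀ (idxs : List Int) (k : Nat),
      (pyCombos idxs k).filterMap (scanTermA sm)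
        = pyCombos (idxs.filterMap (fun i => sm.getD i none)) k := by
  intro idxs
  induction idxs with
  | nil => intro k; cases k <;> simp [pyCombos, scanTermA]
  | cons i rest ih =>
    intro k
    cases k with
    | zero => simp [pyCombos, scanTermA]
    | succ k' =>
      simp only [pyCombos, List.filterMap_append, List.filterMap_map, List.filterMap_cons]
      cases h : sm.getD i none with
      | none =>
        have hz : (scanTermA sm ∘ (i :: ·)) = fun _ => (none : Option (List (List Int))) := by
          funext t; simp [Function.comp, scanTermA, h]
        rw [hz, ih]
        simp
      | some l =>
        have hz : (scanTermA sm ∘ (i :: ·))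
            = fun t => (scanTermA sm t).map (l :: ·) := by
          funext t; simp [Function.comp, scanTermA, h]
        rw [hz, ← List.map_filterMap, ih, ih]
        simp [pyCombos]

-- B's iterative product fold = pyProd with every accumulator prefixed
theorem bProducts_foldl (chosen : List (List Int)) :
    ∀ (ps : List (List Int)),
      chosen.foldl (fun prods l => prods.flatMap (fun p => l.map (fun v => p ++ [v]))) ps
        = ps.flatMap (fun p => (pyProd chosen).map (p ++ ·)) := by
  induction chosen with
  | nil => intro ps; simp [pyProd]
  | cons l ls ih =>
    intro ps
    rw [List.foldl_cons, ih, List.flatMap_assoc]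
    simp only [pyProd, List.map_flatMap, List.map_map, List.flatMap_map]
    congr 1
    funext p
    congr 1
    funext v
    have hfg : ((fun x => p ++ x) ∘ fun x => v :: x) = fun q => (p ++ [v]) ++ q := by
      funext q; simp
    rw [hfg]

theorem bProducts_eq (chosen : List (List Int)) : bProducts chosen = pyProd chosen := by
  rw [bProducts, bProducts_foldl]
  simp

-- too few elements left: no combination of size k
theorem pyCombos_short {α : Type} : ∀ (xs : List α) (k : Nat), xs.length < k → pyCombos xs k = [] := by
  intro xs
  induction xs with
  | nil => intro k hk; cases k with
    | zero => simp at hk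
    | succ k' => rfl
  | cons x rest ih =>
    intro k hk
    cases k with
    | zero => simp at hk
    | succ k' =>
      simp only [List.length_cons] at hk
      rw [pyCombos, ih k' (by omega), ih (k' + 1) (by omega)]
      rfl

-- B's index DFS = flatMap of pyProd over the lexicographic combinations of the remaining suffix
theorem bChoose_eq (valid : List (List Int)) :
    ∀ (k : Nat) (start : Nat) (chosen out : List (List Int)),
      bChoose valid (start : Int) k chosen out
        = out ++ (pyCombos (valid.drop start) k).flatMap (fun c => pyProd (chosen ++ c)) := by
  intro k
  induction k with
  | zero =>
    intro start chosen out
    simp [bChoose, pyCombos, bProducts_eq]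
  | succ k' ihk =>
    -- inner downward induction on the remaining length via a fuel bound
    have main : ∀ (m : Nat) (start : Nat), valid.length - start ≤ m →
        ∀ (chosen out : List (List Int)),
          bChoose valid (start : Int) (k' + 1) chosen out
            = out ++ (pyCombos (valid.drop start) (k' + 1)).flatMap (fun c => pyProd (chosen ++ c)) := by
      intro m
      induction m with
      | zero =>
        intro start hs chosen out
        have hsl : valid.length ≤ start := by omega
        rw [bChoose, PySem.List.pyRange_one_eq_nil (by omega), List.foldl_nil,
          List.drop_eq_nil_of_le hsl]
        simp [pyCombos]
      | succ m' ihm =>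
        intro start hs chosen out
        by_cases hend : valid.length ≤ start + k'
        · -- loop range empty; fewer than k'+1 elements remain
          rw [bChoose, PySem.List.pyRange_one_eq_nil (by omega), List.foldl_nil,
            pyCombos_short (valid.drop start) (k' + 1) (by simp; omega)]
          simp
        · -- loop runs: first index start, then the rest
          have hlt : start < valid.length := by omega
          rw [bChoose, PySem.List.pyRange_one_cons (by omega), List.foldl_cons]
          have hget : PySem.List.pyGetD valid (start : Int) [] = valid[start] := by
            rw [PySem.List.pyGetD_natCast]
            exact List.getD_eq_getElem valid [] hlt
          have hcast : ((start : Int) + 1) = ((start + 1 : Nat) : Int) := by push_cast; ring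
          rw [hget, hcast, ihk (start + 1) (chosen ++ [valid[start]]) out]
          clear hget
          have hfold : ∀ (o : List (List Int)),
              (PySem.List.pyRange ((start + 1 : Nat) : Int) ((valid.length : Int) - (k' + 1) + 1) 1).foldl
                (fun o i => bChoose valid (i + 1) k' (chosen ++ [PySem.List.pyGetD valid i []]) o) o
              = o ++ (pyCombos (valid.drop (start + 1)) (k' + 1)).flatMap (fun c => pyProd (chosen ++ c)) := by
            intro o
            have := ihm (start + 1) (by omega) chosen o
            rw [bChoose] at this
            exact this
          rw [hfold]
          rw [List.drop_eq_getElem_cons hlt, pyCombos, List.flatMap_append, List.flatMap_map]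
          simp only [List.append_assoc]
          congr 2
    intro start
    exact main (valid.length - start) start le_rfl

-- the per-order step functions of the two ports agree
theorem step_eq (sm : PySem.Dict Int (Option (List Int))) (n : Int)
    (sites : List (List Int)) (o : Int) :
    (pyCombos (PySem.List.pyRange 0 n 1) o.toNat).foldl
        (fun sites term =>
          match scanTermA sm term with
          | none => sites
          | some lists => sites ++ pyProd lists)
        sites
      = bChoose (((PySem.List.pyRange 0 n 1).map (fun i => sm.getD i none)).filterMap id)
          0 o.toNat [] sites := by
  rw [foldl_match_scan, pyCombos_filterMap,
    show (0 : Int) = ((0 : Nat) : Int) from rfl, bChoose_eq, List.filterMap_map]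
  simp [Function.comp]

-- ===== VERDICT (by name: the statement is the Claim_ definition above) =====
theorem mutations_to_sites_spec : Claim_equal_mutations_to_sites := by
  intro order mutations start_order _ hpre
  unfold Spec_mutations_to_sites mutations_to_sites mutations_to_sites_alt
  obtain ⟨hneg, -⟩ := hpre
  simp only []
  have hfun := funext fun (s : List (List Int)) => funext fun (o : Int) =>
    step_eq (buildSitemap mutations) ((PySem.Dict.size (buildSitemap mutations) : Int)) s o
  rw [hfun]
  rcases lt_trichotomy start_order 0 with hlt | heq | hgt
  · -- start_order < 0: Pre_ forces order < start_order, both order ranges are empty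
    have hne : ¬ start_order = 0 := by omega
    have h1 : PySem.List.pyRange start_order (order + 1) 1 = [] :=
      PySem.List.pyRange_one_eq_nil (by have := hneg hlt; omega)
    have h2 : PySem.List.pyRange (max start_order 1) (order + 1) 1 = [] :=
      PySem.List.pyRange_one_eq_nil (by have := hneg hlt; omega)
    simp only [if_neg hne, h1, h2]
  · -- start_order = 0: A's range starts at 1 = max 0 1
    subst heq
    rw [if_pos rfl, if_pos rfl, show max (0 : Int) 1 = 1 by decide]
  · -- start_order ≥ 1: the two order ranges coincide
    simp only [if_neg (by omega : ¬ start_order = 0)]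
    rw [show max start_order 1 = start_order from max_eq_left (by omega)]
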